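-- pv_equiv track=rewrite | github.com/pmalo46/lineups | alpha/recap.py | extract_scoring_summary
-- ===== SOURCE A (Python) =====
-- def extract_scoring_summary(play_log):
--     """Pull out scoring half-innings from the play log."""
--     innings = []
--     current_half = None
--     current_events = []
--
--     for line in play_log:
--         if line.startswith('Top ') or line.startswith('Bottom '):
--             if current_half is not None:
--                 innings.append((current_half, current_events))
--             current_half = line
--             current_events = []
--             continue
--         if current_half is not None:
--             current_events.append(line)
--     if current_half is not None:
--         innings.append((current_half, current_events))
--
--     scoring_halves = []
--     for half_label, events in innings:
--         scoring_events = [e for e in events if 'scores:' in e]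
--         if scoring_events:
--             scoring_halves.append((half_label, scoring_events))
--     return scoring_halves
-- ===== SOURCE B (Python) =====
-- def extract_scoring_summary(play_log):
--     """Pull out scoring half-innings by recursively splitting the log at half labels."""
--     def is_half(l):
--         return l.startswith('Top ') or l.startswith('Bottom ')
--
--     def halves(lines):
--         # lines is empty or starts with a half-inning label
--         if not lines:
--             return []
--         label = lines[0]
--         k = 1
--         while k < len(lines) and not is_half(lines[k]):
--             k += 1
--         scoring = [e for e in lines[1:k] if 'scores:' in e]
--         rest = halves(lines[k:])
--         return rest if not scoring else [(label, scoring)] + rest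
--
--     i = 0
--     while i < len(play_log) and not is_half(play_log[i]):
--         i += 1
--     return halves(play_log[i:])
-- ===== Notes on version B (the rewrite author's own statement) =====
-- stated objective: alternative
-- what changed: Replaces A's stateful two-pass loop (accumulate every inning with its full event list, then filter each for scoring events) by a recursive splitter: drop the preamble, then repeatedly split the list at the next half label, filter that segment's scoring events inline, and build the result back-to-front through the recursion with no intermediate innings list or loop state.
import Mathlib
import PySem

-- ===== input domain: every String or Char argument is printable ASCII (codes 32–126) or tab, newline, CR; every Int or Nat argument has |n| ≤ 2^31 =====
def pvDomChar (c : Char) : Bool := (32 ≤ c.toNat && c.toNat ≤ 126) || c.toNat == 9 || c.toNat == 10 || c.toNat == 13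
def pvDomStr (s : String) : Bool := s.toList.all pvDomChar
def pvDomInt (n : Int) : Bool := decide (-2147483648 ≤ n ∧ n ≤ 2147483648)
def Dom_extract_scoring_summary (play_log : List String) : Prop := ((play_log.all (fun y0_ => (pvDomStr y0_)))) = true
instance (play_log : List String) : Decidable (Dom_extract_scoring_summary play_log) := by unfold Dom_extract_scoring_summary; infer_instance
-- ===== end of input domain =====

-- B replaces A's stateful two-pass loop by a recursive splitter at half labels,
-- filtering scoring events inline (alternative decomposition, same cost).

-- line tests shared by both programs
def pvIsHalf (line : String) : Bool :=
  PySem.Str.startswith line "Top " || PySem.Str.startswith line "Bottom "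
def pvIsScoring (e : String) : Bool := PySem.Str.isIn "scores:" e

-- ===== PORT A =====
-- first loop of A; state: (innings, current_half, current_events)
def pvStepA (st : List (String × List String) × Option String × List String) (line : String) :
    List (String × List String) × Option String × List String :=
  if pvIsHalf line then
    ((match st.2.1 with
      | some h => st.1 ++ [(h, st.2.2)]
      | none => st.1), some line, [])
  else
    match st.2.1 with
    | some _ => (st.1, st.2.1, st.2.2 ++ [line])
    | none => st

-- second loop of A: keep halves with a non-empty scoring filter
def pvFilterStep (acc : List (String × List String)) (p : String × List String) :
    List (String × List String) :=
  let se := p.2.filter pvIsScoring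
  if se.isEmpty then acc else acc ++ [(p.1, se)]

def extract_scoring_summary (play_log : List String) : List (String × List String) :=
  let st := play_log.foldl pvStepA ([], none, [])
  let innings :=
    match st.2.1 with
    | some h => st.1 ++ [(h, st.2.2)]
    | none => st.1
  innings.foldl pvFilterStep []

-- ===== PORT B =====
-- recursive splitter: lines is empty or starts with a half label; split off the
-- segment up to the next half label, keep its scoring events if any, recurse
def pvHalves : List String → List (String × List String)
  | [] => []
  | label :: rest =>
      let scoring := (rest.takeWhile (fun l => !pvIsHalf l)).filter pvIsScoring
      let tail := pvHalves (rest.dropWhile (fun l => !pvIsHalf l))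
      if scoring.isEmpty then tail else (label, scoring) :: tail
  termination_by l => l.length
  decreasing_by
    have := List.length_dropWhile_le (fun l => !pvIsHalf l) rest
    simpa using Nat.lt_succ_of_le this

def extract_scoring_summary_alt (play_log : List String) : List (String × List String) :=
  pvHalves (play_log.dropWhile (fun l => !pvIsHalf l))

-- ===== PRECONDITION & SPEC =====
def Spec_extract_scoring_summary (play_log : List String) (out : List (String × List String)) : Prop := out = extract_scoring_summary_alt play_log
instance (play_log : List String) (out : List (String × List String)) : Decidable (Spec_extract_scoring_summary play_log out) := by unfold Spec_extract_scoring_summary; infer_instance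

-- ===== CLAIM (what is proved, stated in full; the proofs are below) =====
def Claim_equal_extract_scoring_summary : Prop := ∀ (play_log : List String), Dom_extract_scoring_summary play_log → Spec_extract_scoring_summary play_log (extract_scoring_summary play_log)

-- ===== LEMMAS AND PROOFS =====

-- A's finalisation: flush the pending half, then the filtering pass
def pvFinishA (st : List (String × List String) × Option String × List String) :
    List (String × List String) :=
  (match st.2.1 with
   | some h => st.1 ++ [(h, st.2.2)]
   | none => st.1).foldl pvFilterStep []

-- the emitted segment for one half
def pvEmit (h : String) (ce : List String) : List (String × List String) :=
  if (ce.filter pvIsScoring).isEmpty then [] else [(h, ce.filter pvIsScoring)]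

lemma foldl_filterStep (acc : List (String × List String)) (l : List (String × List String)) :
    l.foldl pvFilterStep acc = acc ++ l.foldl pvFilterStep [] := by
  induction l generalizing acc with
  | nil => simp
  | cons p t ih =>
    simp only [List.foldl_cons]
    rw [ih, ih (pvFilterStep [] p)]
    by_cases hse : (List.filter pvIsScoring p.2).isEmpty
    · simp [pvFilterStep, hse]
    · simp [pvFilterStep, hse]

-- non-half lines just accumulate into current_events
lemma foldA_body (body : List String) (hb : ∀ l ∈ body, pvIsHalf l = false)
    (innings : List (String × List String)) (h : String) (ce : List String) :
    body.foldl pvStepA (innings, some h, ce) = (innings, some h, ce ++ body) := by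
  induction body generalizing ce with
  | nil => simp
  | cons x t ih =>
    have hx : pvIsHalf x = false := hb x (by simp)
    simp only [List.foldl_cons, pvStepA, hx]
    simpa using ih (fun l hl => hb l (by simp [hl])) (ce ++ [x])

lemma emit_singleton (h : String) (ce : List String) :
    pvFilterStep [] (h, ce) = pvEmit h ce := by
  by_cases hse : (ce.filter pvIsScoring).isEmpty
  · simp [pvFilterStep, pvEmit, hse]
  · simp [pvFilterStep, pvEmit, hse]

-- main invariant: from a some-state, on a log that is empty or starts with a half label
lemma foldA_main_aux : ∀ (n : Nat) (log : List String), log.length = n →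
    (log = [] ∨ ∃ x t, log = x :: t ∧ pvIsHalf x = true) →
    ∀ (innings : List (String × List String)) (h : String) (ce : List String),
    pvFinishA (log.foldl pvStepA (innings, some h, ce))
      = innings.foldl pvFilterStep [] ++ pvEmit h ce ++ pvHalves log := by
  intro n
  induction n using Nat.strong_induction_on with
  | _ n ih =>
  intro log hlen hd innings h ce
  cases log with
  | nil =>
    show pvFinishA (innings, some h, ce) = _
    unfold pvFinishA
    rw [List.foldl_append, foldl_filterStep, List.foldl_cons, List.foldl_nil, emit_singleton]
    simp [pvHalves]
  | cons x t =>
    have hx : pvIsHalf x = true := by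
      rcases hd with he | ⟨x', t', he, hx'⟩
      · cases he
      · cases he; exact hx'
    have hsplit : t = t.takeWhile (fun l => !pvIsHalf l) ++ t.dropWhile (fun l => !pvIsHalf l) :=
      (List.takeWhile_append_dropWhile).symm
    have hbAll : ∀ l ∈ t.takeWhile (fun l => !pvIsHalf l), pvIsHalf l = false := by
      intro l hl
      have := List.mem_takeWhile_imp hl
      simpa using this
    have hrestShape : t.dropWhile (fun l => !pvIsHalf l) = []
        ∨ ∃ y s, t.dropWhile (fun l => !pvIsHalf l) = y :: s ∧ pvIsHalf y = true := by
      cases hr : t.dropWhile (fun l => !pvIsHalf l) with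
      | nil => exact Or.inl rfl
      | cons y s =>
        refine Or.inr ⟨y, s, rfl, ?_⟩
        have := List.head?_dropWhile_not (fun l => !pvIsHalf l) t
        rw [hr] at this
        simpa using this
    have hlt : (t.dropWhile (fun l => !pvIsHalf l)).length < n := by
      have h1 := List.length_dropWhile_le (fun l => !pvIsHalf l) t
      simp only [List.length_cons] at hlen
      omega
    have hIH := ih _ hlt (t.dropWhile (fun l => !pvIsHalf l)) rfl hrestShape
      (innings ++ [(h, ce)]) x (t.takeWhile (fun l => !pvIsHalf l))
    calc pvFinishA ((x :: t).foldl pvStepA (innings, some h, ce))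
        = pvFinishA ((t.takeWhile (fun l => !pvIsHalf l)
            ++ t.dropWhile (fun l => !pvIsHalf l)).foldl pvStepA
            (innings ++ [(h, ce)], some x, [])) := by
          rw [← hsplit]; simp [pvStepA, hx]
      _ = pvFinishA ((t.dropWhile (fun l => !pvIsHalf l)).foldl pvStepA
            (innings ++ [(h, ce)], some x, t.takeWhile (fun l => !pvIsHalf l))) := by
          rw [List.foldl_append, foldA_body _ hbAll]; simp
      _ = (innings ++ [(h, ce)]).foldl pvFilterStep []
            ++ pvEmit x (t.takeWhile (fun l => !pvIsHalf l))
            ++ pvHalves (t.dropWhile (fun l => !pvIsHalf l)) := hIH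
      _ = innings.foldl pvFilterStep [] ++ pvEmit h ce ++ pvHalves (x :: t) := by
          rw [List.foldl_append, foldl_filterStep, List.foldl_cons, List.foldl_nil,
            emit_singleton]
          have hhx : pvHalves (x :: t)
              = pvEmit x (t.takeWhile (fun l => !pvIsHalf l))
                ++ pvHalves (t.dropWhile (fun l => !pvIsHalf l)) := by
            rw [pvHalves]
            by_cases hse : ((t.takeWhile (fun l => !pvIsHalf l)).filter pvIsScoring).isEmpty
            · simp [pvEmit, hse]
            · simp [pvEmit, hse]
          rw [hhx]; simp

lemma foldA_main (log : List String)
    (hd : log = [] ∨ ∃ x t, log = x :: t ∧ pvIsHalf x = true)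
    (innings : List (String × List String)) (h : String) (ce : List String) :
    pvFinishA (log.foldl pvStepA (innings, some h, ce))
      = innings.foldl pvFilterStep [] ++ pvEmit h ce ++ pvHalves log :=
  foldA_main_aux log.length log rfl hd innings h ce

-- non-half lines are skipped while current_half is None
lemma foldA_pre (pre : List String) (hp : ∀ l ∈ pre, pvIsHalf l = false)
    (rest : List String) :
    (pre ++ rest).foldl pvStepA ([], none, []) = rest.foldl pvStepA ([], none, []) := by
  induction pre with
  | nil => simp
  | cons x t ih =>
    have hx : pvIsHalf x = false := hp x (by simp)
    simp only [List.cons_append, List.foldl_cons, pvStepA, hx]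
    exact ih (fun l hl => hp l (by simp [hl]))

-- ===== VERDICT (by name: the statement is the Claim_ definition above) =====
theorem extract_scoring_summary_spec : Claim_equal_extract_scoring_summary := by
  intro play_log _
  show extract_scoring_summary play_log = extract_scoring_summary_alt play_log
  have hsplit : play_log = play_log.takeWhile (fun l => !pvIsHalf l)
      ++ play_log.dropWhile (fun l => !pvIsHalf l) :=
    (List.takeWhile_append_dropWhile).symm
  set pre := play_log.takeWhile (fun l => !pvIsHalf l) with hpre
  set rest := play_log.dropWhile (fun l => !pvIsHalf l) with hrest
  have hpAll : ∀ l ∈ pre, pvIsHalf l = false := by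
    intro l hl
    have := List.mem_takeWhile_imp hl
    simpa using this
  have hA : extract_scoring_summary play_log = pvFinishA (rest.foldl pvStepA ([], none, [])) := by
    unfold extract_scoring_summary pvFinishA
    rw [hsplit, foldA_pre pre hpAll rest]
  rw [hA]
  show pvFinishA (rest.foldl pvStepA ([], none, [])) = pvHalves rest
  cases hr : rest with
  | nil => simp [pvFinishA, pvHalves]
  | cons y s =>
    have hy : pvIsHalf y = true := by
      have := List.head?_dropWhile_not (fun l => !pvIsHalf l) play_log
      rw [← hrest, hr] at this
      simpa using this
    have hsShape : s.dropWhile (fun l => !pvIsHalf l) = []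
        ∨ ∃ z u, s.dropWhile (fun l => !pvIsHalf l) = z :: u ∧ pvIsHalf z = true := by
      cases hs : s.dropWhile (fun l => !pvIsHalf l) with
      | nil => exact Or.inl rfl
      | cons z u =>
        refine Or.inr ⟨z, u, rfl, ?_⟩
        have := List.head?_dropWhile_not (fun l => !pvIsHalf l) s
        rw [hs] at this
        simpa using this
    have hbAll : ∀ l ∈ s.takeWhile (fun l => !pvIsHalf l), pvIsHalf l = false := by
      intro l hl
      have := List.mem_takeWhile_imp hl
      simpa using this
    have hstep : (y :: s).foldl pvStepA ([], none, [])
        = (s.dropWhile (fun l => !pvIsHalf l)).foldl pvStepA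
            ([], some y, s.takeWhile (fun l => !pvIsHalf l)) := by
      conv_lhs => rw [List.foldl_cons]
      have : pvStepA ([], none, []) y = ([], some y, []) := by simp [pvStepA, hy]
      rw [this]
      conv_lhs => rw [show s = s.takeWhile (fun l => !pvIsHalf l)
        ++ s.dropWhile (fun l => !pvIsHalf l) from (List.takeWhile_append_dropWhile).symm]
      rw [List.foldl_append, foldA_body _ hbAll]
      simp
    rw [hstep, foldA_main _ hsShape]
    rw [pvHalves]
    simp only [pvEmit]
    split_ifs <;> simp
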